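-- pv_equiv track=rewrite | github.com/CoRAL-ASU/PerceptualObservatory | scripts/image_matching/parse_im_word.py | parse_support_id
-- ===== SOURCE A (Python) =====
-- def parse_support_id(task_id: str) -> str:
--     """Extract test* ID from task_id string like 'im:test62:aug1'."""
--     if not task_id:
--         return None
--     parts = task_id.split(":")
--     for p in parts:
--         if p.startswith("test"):
--             return p
--     return None
-- ===== SOURCE B (Python) =====
-- def parse_support_id(task_id: str) -> str:
--     """Extract test* ID by scanning colon-delimited segments in place (no parts list)."""
--     n = len(task_id)
--     start = 0
--     while True:
--         end = task_id.find(":", start)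
--         if end == -1:
--             end = n
--         if task_id.startswith("test", start):
--             return task_id[start:end]
--         if end == n:
--             return None
--         start = end + 1
-- ===== Notes on version B (the rewrite author's own statement) =====
-- stated objective: alternative
-- what changed: B scans the string in place segment by segment with find/startswith/slice instead of building the full colon-split parts list and looping over it.
import Mathlib
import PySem

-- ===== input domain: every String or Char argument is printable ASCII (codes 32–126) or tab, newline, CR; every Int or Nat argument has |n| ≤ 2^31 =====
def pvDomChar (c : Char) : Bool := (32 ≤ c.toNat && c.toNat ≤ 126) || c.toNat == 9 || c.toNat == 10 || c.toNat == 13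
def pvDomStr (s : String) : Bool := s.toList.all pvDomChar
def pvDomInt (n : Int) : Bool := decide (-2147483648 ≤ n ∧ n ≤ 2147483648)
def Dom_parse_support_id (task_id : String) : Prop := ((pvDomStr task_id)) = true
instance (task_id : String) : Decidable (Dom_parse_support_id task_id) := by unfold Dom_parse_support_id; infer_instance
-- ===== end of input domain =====

-- B replaces split-then-scan with an in-place scan over colon-delimited segments (objective: alternative).

-- ===== PORT A =====
-- the 'for p in parts' loop of A
def pvLoopA : List String → Option String
  | [] => none
  | p :: ps => if PySem.Str.startswith p "test" then some p else pvLoopA ps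

def parse_support_id (task_id : String) : Option String :=
  if task_id = "" then none
  else
    -- task_id.split(":"): sep is nonempty so split? is always some; getD [] only makes it total
    let parts := (PySem.Str.split? task_id ":").getD []
    pvLoopA parts

-- ===== PORT B =====
-- Source B's while-loop over the remaining suffix: find(":", start)/slice ≈ takeWhile/dropWhile on the
-- suffix from 'start'; startswith("test", start) ≈ isPrefixOf on that suffix (exact on all inputs).
def pvAltGo (cs : List Char) : Option String :=
  if ("test".toList).isPrefixOf cs then some (String.ofList (cs.takeWhile (fun c => c ≠ ':')))
  else
    match h : cs.dropWhile (fun c => c ≠ ':') with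
    | [] => none
    | _ :: rest => pvAltGo rest
termination_by cs.length
decreasing_by
  have h1 : (cs.dropWhile (fun c => c ≠ ':')).length ≤ cs.length :=
    List.length_dropWhile_le _ cs
  rw [h] at h1; simp at h1; omega

def parse_support_id_alt (task_id : String) : Option String :=
  pvAltGo task_id.toList

-- ===== PRECONDITION & SPEC =====
def Spec_parse_support_id (task_id : String) (out : Option String) : Prop := out = parse_support_id_alt task_id
instance (task_id : String) (out : Option String) : Decidable (Spec_parse_support_id task_id out) := by unfold Spec_parse_support_id; infer_instance

-- ===== CLAIM (what is proved, stated in full; the proofs are below) =====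
def Claim_equal_parse_support_id : Prop := ∀ (task_id : String), Dom_parse_support_id task_id → Spec_parse_support_id task_id (parse_support_id task_id)

-- ===== LEMMAS AND PROOFS =====

-- simple recursive characterisation of split on a single colon
def pvSplitC (cs : List Char) : List (List Char) :=
  (cs.takeWhile (fun c => c ≠ ':')) ::
    (match h : cs.dropWhile (fun c => c ≠ ':') with
     | [] => []
     | _ :: rest => pvSplitC rest)
termination_by cs.length
decreasing_by
  have h1 : (cs.dropWhile (fun c => c ≠ ':')).length ≤ cs.length :=
    List.length_dropWhile_le _ cs
  rw [h] at h1; simp at h1; omega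

lemma pvSplitC_eq (cs : List Char) :
    pvSplitC cs = (cs.takeWhile (fun c => c ≠ ':')) ::
      (match cs.dropWhile (fun c => c ≠ ':') with
       | [] => []
       | _ :: rest => pvSplitC rest) := by
  rw [pvSplitC]
  congr 1
  split <;> rename_i h' <;> rw [h']

lemma pvSplitC_cons_shape (cs : List Char) :
    pvSplitC cs = (pvSplitC cs).headI :: (pvSplitC cs).tail := by
  rw [pvSplitC_eq]; rfl

lemma pvGo_spec (fuel : Nat) (l cur : List Char) (acc : List (List Char)) (hf : l.length ≤ fuel) :
    PySem.Chars.splitOn.go [':'] fuel l cur acc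
      = acc.reverse ++ (cur.reverse ++ (pvSplitC l).headI) :: (pvSplitC l).tail := by
  induction fuel generalizing l cur acc with
  | zero =>
      cases l with
      | nil =>
          simp [PySem.Chars.splitOn.go, pvSplitC_eq]
      | cons c rest => simp at hf
  | succ f ihf =>
      cases l with
      | nil =>
          simp [PySem.Chars.splitOn.go, pvSplitC_eq]
      | cons c rest =>
          by_cases hc : c = ':'
          · subst hc
            have hrec := ihf rest [] ((cur.reverse) :: acc) (by simp at hf; omega)
            simp only [PySem.Chars.splitOn.go, List.isPrefixOf, beq_self_eq_true, Bool.true_and,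
              List.isPrefixOf_nil_left, if_true, List.length_cons, List.drop_succ_cons,
              List.drop_zero] at *
            simp only [List.length_nil, List.drop_zero]
            rw [hrec]
            rw [pvSplitC_eq (':' :: rest)]
            simp [← pvSplitC_cons_shape rest]
          · have hrec := ihf rest (c :: cur) acc (by simp at hf; omega)
            have hpre : ([':'].isPrefixOf (c :: rest)) = false := by
              simp [List.isPrefixOf, Ne.symm hc]
            simp only [PySem.Chars.splitOn.go, hpre, if_false, Bool.false_eq_true]
            rw [hrec]
            have h1 : (c :: rest).takeWhile (fun c => c ≠ ':') = c :: rest.takeWhile (fun c => c ≠ ':') := by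
              simp [List.takeWhile_cons, hc]
            have h2 : (c :: rest).dropWhile (fun c => c ≠ ':') = rest.dropWhile (fun c => c ≠ ':') := by
              simp [List.dropWhile_cons, hc]
            rw [pvSplitC_eq (c :: rest), pvSplitC_eq rest]
            simp only [decide_not] at h1 h2 ⊢
            rw [h1, h2]
            simp

lemma pvSplitOn_eq (cs : List Char) :
    PySem.Chars.splitOn cs [':'] = pvSplitC cs := by
  unfold PySem.Chars.splitOn
  rw [pvGo_spec (cs.length + 1) cs [] [] (by omega)]
  simp [← pvSplitC_cons_shape cs]

def pvLoopC : List (List Char) → Option String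
  | [] => none
  | p :: ps => if ("test".toList).isPrefixOf p then some (String.ofList p) else pvLoopC ps

lemma pvLoopA_eq (parts : List String) : pvLoopA parts = pvLoopC (parts.map String.toList) := by
  induction parts with
  | nil => rfl
  | cons p ps ih =>
      simp only [pvLoopA, pvLoopC, List.map, PySem.Str.startswith_eq, PySem.Chars.startswith, ih]
      split <;> simp [String.ofList_toList]

lemma pvPref_takeWhile (p : List Char) (hp : ∀ a ∈ p, a ≠ ':') (cs : List Char) :
    p.isPrefixOf (cs.takeWhile (fun c => c ≠ ':')) = p.isPrefixOf cs := by
  induction p generalizing cs with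
  | nil => simp [List.isPrefixOf]
  | cons a p' ih =>
      cases cs with
      | nil => simp [List.isPrefixOf]
      | cons c cs' =>
          by_cases hc : c = ':'
          · subst hc
            have ha : a ≠ ':' := hp a (by simp)
            simp [List.takeWhile, List.isPrefixOf, ha]
          · have hih := ih (fun a ha => hp a (by simp [ha])) cs'
            simp only [List.takeWhile_cons, decide_not] at hih ⊢
            simp only [hc, decide_false, Bool.not_false, if_true]
            show (a == c && p'.isPrefixOf _) = (a == c && p'.isPrefixOf cs')
            rw [hih]

lemma pvTest_colonfree : ∀ a ∈ ("test".toList), a ≠ ':' := by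
  rw [show ("test".toList) = ['t', 'e', 's', 't'] by simp]
  intro a ha
  fin_cases ha <;> simp

lemma pvLoopC_splitC (cs : List Char) : pvLoopC (pvSplitC cs) = pvAltGo cs := by
  induction cs using pvAltGo.induct with
  | case1 cs hpre =>
      have hA : pvAltGo cs = some (String.ofList (cs.takeWhile (fun c => c ≠ ':'))) := by
        rw [pvAltGo, if_pos hpre]
      have hpf : ("test".toList).isPrefixOf (cs.takeWhile (fun c => c ≠ ':')) = true := by
        rw [pvPref_takeWhile _ pvTest_colonfree]; exact hpre
      rw [pvSplitC_eq]
      simp only [pvLoopC, hpf, hA]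
      simp
  | case2 cs hpre hdrop =>
      have hA : pvAltGo cs = none := by
        rw [pvAltGo, if_neg hpre]
        split
        · rfl
        · rename_i _ _ h'; rw [hdrop] at h'; cases h'
      have hpf : ("test".toList).isPrefixOf (cs.takeWhile (fun c => c ≠ ':')) = false := by
        rw [pvPref_takeWhile _ pvTest_colonfree]
        exact Bool.eq_false_iff.mpr hpre
      rw [pvSplitC_eq]
      simp only [hdrop, pvLoopC, hpf, Bool.false_eq_true, if_false, hA]
  | case3 cs hpre x rest hdrop ih =>
      have hA : pvAltGo cs = pvAltGo rest := by
        rw [pvAltGo, if_neg hpre]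
        split
        · rename_i h'; rw [hdrop] at h'; cases h'
        · rename_i _ _ h'; rw [hdrop] at h'
          injection h' with h1 h2; rw [h2]
      have hpf : ("test".toList).isPrefixOf (cs.takeWhile (fun c => c ≠ ':')) = false := by
        rw [pvPref_takeWhile _ pvTest_colonfree]
        exact Bool.eq_false_iff.mpr hpre
      rw [pvSplitC_eq]
      simp only [hdrop, pvLoopC, hpf, Bool.false_eq_true, if_false, hA, ih]

theorem pv_main (cs : List Char) : pvLoopC (PySem.Chars.splitOn cs [':']) = pvAltGo cs := by
  rw [pvSplitOn_eq, pvLoopC_splitC]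

-- ===== VERDICT (by name: the statement is the Claim_ definition above) =====
theorem parse_support_id_spec : Claim_equal_parse_support_id := by
  intro t _
  unfold Spec_parse_support_id parse_support_id parse_support_id_alt
  by_cases ht : t = ""
  · subst ht; simp [pvAltGo]
  · simp only [ht, if_false]
    have hmap := PySem.Str.split?_map t ":"
    cases hsp : PySem.Str.split? t ":" with
    | none => rw [hsp] at hmap; simp [PySem.Chars.split?] at hmap
    | some ps =>
        rw [hsp] at hmap
        simp only [Option.map_some, PySem.Chars.split?] at hmap
        have hps : ps.map String.toList = PySem.Chars.splitOn t.toList [':'] := by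
          simpa using hmap
        simp only [Option.getD_some]
        rw [pvLoopA_eq, hps, pv_main]
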